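-- pv_equiv track=rewrite | github.com/DongKeon/webrtc-whisper-asr | tools.py | filter_vp8_codec
-- ===== SOURCE A (Python) =====
-- def filter_vp8_codec(sdp_data):
--     lines = sdp_data.split('\r\n')
--     filtered_lines = []
--
--     video_section = False
--     for line in lines:
--         # Keeping non-media lines
--         if not line.startswith('m='):
--             if video_section:
--                 if line.startswith('a=rtpmap:') and 'VP8' in line:
--                     filtered_lines.append(line)
--                     continue  # Skip other codec lines
--                 elif line.startswith('a=rtpmap:') and 'VP8' not in line:
--                     continue  # Skip other codec lines
--                 elif line.startswith('a=rtcp-fb:') and any(codecs in line for codecs in ['97', '98', '99', '100', '101', '102']):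
--                     continue  # Skip other codec lines
--                 elif line.startswith('a=fmtp:') and any(codecs in line for codecs in ['97', '98', '99', '100', '101', '102']):
--                     continue  # Skip other codec lines
--             filtered_lines.append(line)
--         else:
--             if 'audio' in line or 'application' in line:
--                 filtered_lines.append(line)
--                 video_section = False
--             elif 'video' in line:
--                 video_section = True
--                 # Keeping only the VP8 codec (97)
--                 filtered_lines.append('m=video 9 UDP/TLS/RTP/SAVPF 97')
--
--     # Reconstructing the SDP
--     filtered_sdp = '\r\n'.join(filtered_lines)
--
--     return filtered_sdp
-- ===== SOURCE B (Python) =====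
-- def _keep_in_video(line):
--     if line.startswith('a=rtpmap:'):
--         return 'VP8' in line
--     if (line.startswith('a=rtcp-fb:') or line.startswith('a=fmtp:')) and \
--             any(c in line for c in ['97', '98', '99', '100', '101', '102']):
--         return False
--     return True
--
--
-- def filter_vp8_codec(sdp_data):
--     lines = sdp_data.split('\r\n')
--     # Phase 1: partition into a preamble and one (m-line, body) segment per 'm=' line.
--     pre = []
--     segs = []
--     cur = pre
--     for line in lines:
--         if line.startswith('m='):
--             cur = []
--             segs.append((line, cur))
--         else:
--             cur.append(line)
--     # Phase 2: emit the preamble verbatim, then each segment according to its m= line.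
--     out = list(pre)
--     vid = False
--     for m, body in segs:
--         if 'audio' in m or 'application' in m:
--             out.append(m)
--             vid = False
--         elif 'video' in m:
--             out.append('m=video 9 UDP/TLS/RTP/SAVPF 97')
--             vid = True
--         out.extend(filter(_keep_in_video, body) if vid else body)
--     return '\r\n'.join(out)
-- ===== Notes on version B (the rewrite author's own statement) =====
-- stated objective: alternative
-- what changed: Replaces A's single stateful line loop (a video_section flag mutated while filtering) with a two-phase decomposition: first partition the lines into a preamble plus one (m-line, body) segment per media line, then emit each segment as a whole, filtering a segment's body with a pure per-line predicate.
import Mathlib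
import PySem

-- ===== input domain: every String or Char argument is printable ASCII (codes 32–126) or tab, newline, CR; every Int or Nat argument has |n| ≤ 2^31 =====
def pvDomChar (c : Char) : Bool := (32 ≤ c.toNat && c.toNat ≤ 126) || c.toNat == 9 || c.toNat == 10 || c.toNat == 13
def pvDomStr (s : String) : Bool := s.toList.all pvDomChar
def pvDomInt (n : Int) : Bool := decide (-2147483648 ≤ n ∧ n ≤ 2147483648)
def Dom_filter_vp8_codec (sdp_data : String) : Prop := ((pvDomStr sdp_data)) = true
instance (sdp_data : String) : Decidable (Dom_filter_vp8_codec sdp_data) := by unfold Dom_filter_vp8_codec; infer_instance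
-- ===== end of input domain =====

-- B replaces A's single stateful line loop with a partition-into-segments pass plus a per-segment emitter (alternative decomposition, same cost).

-- ===== PORT A =====
def pvAnyCodec (line : String) : Bool :=
  (["97", "98", "99", "100", "101", "102"] : List String).any (fun c => PySem.Str.isIn c line)

def pvStepA (st : Bool × List String) (line : String) : Bool × List String :=
  let video_section := st.1
  let filtered := st.2
  if !(PySem.Str.startswith line "m=") then
    if video_section then
      if PySem.Str.startswith line "a=rtpmap:" && PySem.Str.isIn "VP8" line then
        (video_section, filtered ++ [line])
      else if PySem.Str.startswith line "a=rtpmap:" && !(PySem.Str.isIn "VP8" line) then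
        (video_section, filtered)
      else if PySem.Str.startswith line "a=rtcp-fb:" && pvAnyCodec line then
        (video_section, filtered)
      else if PySem.Str.startswith line "a=fmtp:" && pvAnyCodec line then
        (video_section, filtered)
      else
        (video_section, filtered ++ [line])
    else
      (video_section, filtered ++ [line])
  else
    if PySem.Str.isIn "audio" line || PySem.Str.isIn "application" line then
      (false, filtered ++ [line])
    else if PySem.Str.isIn "video" line then
      (true, filtered ++ ["m=video 9 UDP/TLS/RTP/SAVPF 97"])
    else
      (video_section, filtered)

def filter_vp8_codec (sdp_data : String) : String :=
  let lines := (PySem.Str.split? sdp_data "\r\n").getD []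
  let res := lines.foldl pvStepA (false, [])
  PySem.Str.join "\r\n" res.2

-- ===== PORT B =====
def pvKeepInVideo (line : String) : Bool :=
  if PySem.Str.startswith line "a=rtpmap:" then PySem.Str.isIn "VP8" line
  else if (PySem.Str.startswith line "a=rtcp-fb:" || PySem.Str.startswith line "a=fmtp:")
          && pvAnyCodec line then false
  else true

-- phase 1 of Source B: partition the line list into the preamble and (m-line, body) segments
def pvSplitSegs : List String → List String × List (String × List String)
  | [] => ([], [])
  | l :: rest =>
    let (pre, segs) := pvSplitSegs rest
    if PySem.Str.startswith l "m=" then ([], (l, pre) :: segs)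
    else (l :: pre, segs)

-- phase 2 of Source B: emit the segments, carrying the in-video flag between segments
def pvEmitSegs (vid : Bool) : List (String × List String) → List String
  | [] => []
  | (m, body) :: rest =>
    let hv : List String × Bool :=
      if PySem.Str.isIn "audio" m || PySem.Str.isIn "application" m then ([m], false)
      else if PySem.Str.isIn "video" m then (["m=video 9 UDP/TLS/RTP/SAVPF 97"], true)
      else ([], vid)
    hv.1 ++ (if hv.2 then body.filter pvKeepInVideo else body) ++ pvEmitSegs hv.2 rest

def filter_vp8_codec_alt (sdp_data : String) : String :=
  let lines := (PySem.Str.split? sdp_data "\r\n").getD []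
  let ps := pvSplitSegs lines
  PySem.Str.join "\r\n" (ps.1 ++ pvEmitSegs false ps.2)

-- ===== PRECONDITION & SPEC =====
def Spec_filter_vp8_codec (sdp_data : String) (out : String) : Prop := out = filter_vp8_codec_alt sdp_data
instance (sdp_data : String) (out : String) : Decidable (Spec_filter_vp8_codec sdp_data out) := by unfold Spec_filter_vp8_codec; infer_instance

-- ===== CLAIM (what is proved, stated in full; the proofs are below) =====
def Claim_equal_filter_vp8_codec : Prop := ∀ (sdp_data : String), Dom_filter_vp8_codec sdp_data → Spec_filter_vp8_codec sdp_data (filter_vp8_codec sdp_data)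

-- ===== LEMMAS AND PROOFS =====

-- what B emits for a whole line list, given the incoming flag
def pvEmitAll (vid : Bool) (lines : List String) : List String :=
  let ps := pvSplitSegs lines
  (if vid then ps.1.filter pvKeepInVideo else ps.1) ++ pvEmitSegs vid ps.2

theorem pvEmitAll_nil (vid : Bool) : pvEmitAll vid [] = [] := by
  simp [pvEmitAll, pvSplitSegs, pvEmitSegs]

theorem pvEmitAll_cons_nonm (vid : Bool) (l : String) (rest : List String)
    (h : PySem.Str.startswith l "m=" = false) :
    pvEmitAll vid (l :: rest) =
      (if vid then (if pvKeepInVideo l then [l] else []) else [l]) ++ pvEmitAll vid rest := by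
  have h' : PySem.Chars.startswith l.toList ['m', '='] = false := by simpa using h
  cases hs : pvSplitSegs rest with
  | mk pre segs =>
    simp only [pvEmitAll, pvSplitSegs, hs]
    cases vid <;> simp [h']
    cases hk : pvKeepInVideo l <;> simp [hk]

theorem pvEmitAll_cons_m (vid : Bool) (l : String) (rest : List String)
    (h : PySem.Str.startswith l "m=" = true) :
    pvEmitAll vid (l :: rest) =
      (if PySem.Str.isIn "audio" l || PySem.Str.isIn "application" l then
        l :: pvEmitAll false rest
      else if PySem.Str.isIn "video" l then
        "m=video 9 UDP/TLS/RTP/SAVPF 97" :: pvEmitAll true rest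
      else pvEmitAll vid rest) := by
  have h' : PySem.Chars.startswith l.toList ['m', '='] = true := by simpa using h
  cases hs : pvSplitSegs rest with
  | mk pre segs =>
    simp only [pvEmitAll, pvSplitSegs, hs]
    by_cases hau : PySem.Chars.isIn ['a', 'u', 'd', 'i', 'o'] l.toList = true
    · simp [pvEmitSegs, h', hau]
    · by_cases hap : PySem.Chars.isIn ['a', 'p', 'p', 'l', 'i', 'c', 'a', 't', 'i', 'o', 'n'] l.toList = true
      · simp [pvEmitSegs, h', hap]
      · by_cases hv : PySem.Chars.isIn ['v', 'i', 'd', 'e', 'o'] l.toList = true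
        · simp [pvEmitSegs, h', hau, hap, hv]
        · cases vid <;> simp [pvEmitSegs, h', hau, hap, hv]

-- A's filtering branch chain for a non-media line in a video section is pvKeepInVideo
theorem pvStepA_nonm_true (l : String) (acc : List String)
    (h : PySem.Str.startswith l "m=" = false) :
    pvStepA (true, acc) l = (true, acc ++ (if pvKeepInVideo l then [l] else [])) := by
  have h' : PySem.Chars.startswith l.toList ['m', '='] = false := by simpa using h
  simp only [pvStepA, pvKeepInVideo]
  by_cases h1 : PySem.Str.startswith l "a=rtpmap:" = true <;>
    by_cases h2 : PySem.Str.isIn "VP8" l = true <;>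
    by_cases h3 : PySem.Str.startswith l "a=rtcp-fb:" = true <;>
    by_cases h4 : PySem.Str.startswith l "a=fmtp:" = true <;>
    by_cases h5 : pvAnyCodec l = true <;>
    simp_all

-- the main invariant: A's fold from any state equals acc ++ what B emits for that flag
theorem pvMain (lines : List String) : ∀ (vid : Bool) (acc : List String),
    (lines.foldl pvStepA (vid, acc)).2 = acc ++ pvEmitAll vid lines := by
  induction lines with
  | nil => intro vid acc; simp [pvEmitAll_nil]
  | cons l rest ih =>
    intro vid acc
    by_cases hm : PySem.Str.startswith l "m=" = true
    · rw [List.foldl_cons, pvEmitAll_cons_m vid l rest hm]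
      by_cases ha : (PySem.Str.isIn "audio" l || PySem.Str.isIn "application" l) = true
      · have hstep : pvStepA (vid, acc) l = (false, acc ++ [l]) := by
          have ha' := ha; simp only [Bool.or_eq_true] at ha'
          rcases ha' with h | h <;> simp_all [pvStepA]
        rw [hstep, ih, if_pos ha]; simp
      · by_cases hv : PySem.Str.isIn "video" l = true
        · have hstep : pvStepA (vid, acc) l = (true, acc ++ ["m=video 9 UDP/TLS/RTP/SAVPF 97"]) := by
            simp only [Bool.not_eq_true, Bool.or_eq_false_iff] at ha
            simp_all [pvStepA]
          rw [hstep, ih, if_neg (by simp_all), if_pos hv]; simp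
        · have hstep : pvStepA (vid, acc) l = (vid, acc) := by
            simp only [Bool.not_eq_true, Bool.or_eq_false_iff] at ha
            simp only [Bool.not_eq_true] at hv
            simp_all [pvStepA]
          rw [hstep, ih, if_neg (by simp_all), if_neg (by simp_all)]
    · simp only [Bool.not_eq_true] at hm
      rw [List.foldl_cons, pvEmitAll_cons_nonm vid l rest hm]
      cases vid with
      | false =>
        have hstep : pvStepA (false, acc) l = (false, acc ++ [l]) := by simp_all [pvStepA]
        rw [hstep, ih]; simp
      | true =>
        rw [pvStepA_nonm_true l acc hm, ih]
        cases hk : pvKeepInVideo l <;> simp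

-- ===== VERDICT (by name: the statement is the Claim_ definition above) =====
theorem filter_vp8_codec_spec : Claim_equal_filter_vp8_codec := by
  intro sdp_data _
  unfold Spec_filter_vp8_codec filter_vp8_codec filter_vp8_codec_alt
  dsimp only
  rw [pvMain]
  simp [pvEmitAll]
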